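-- pv_equiv track=rewrite | github.com/shafalisingh/Information-Retrieval-Homework-2 | IR_homework_2.py | CalculateLinks
-- ===== SOURCE A (Python) =====
-- def newpage(page,links,link_counts):
--     if page not in links: links[page] = set()
--     if page not in link_counts: link_counts[page] = 0
--
-- def CalculateLinks(G):
--     links = {}
--     link_counts = {}
--     for i, j in G:
--         newpage(i,links,link_counts)
--         newpage(j,links,link_counts)
--
--         if i not in links[j]:
--             links[j].add(i)
--             link_counts[i] += 1
--     return links,link_counts
-- ===== SOURCE B (Python) =====
-- def CalculateLinks(G):
--     links = {}
--     forward = {}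
--     for i, j in G:
--         links.setdefault(i, set())
--         links.setdefault(j, set())
--         forward.setdefault(i, set())
--         forward.setdefault(j, set())
--         links[j].add(i)
--         forward[i].add(j)
--     link_counts = {node: len(targets) for node, targets in forward.items()}
--     return links, link_counts
-- ===== Notes on version B (the rewrite author's own statement) =====
-- stated objective: simpler
-- what changed: B drops A's explicit 'if i not in links[j]' dedup branch and the incremental counter bumps: it maintains a second adjacency-set dict 'forward' (set.add is idempotent, so no membership guard is needed) and derives link_counts at the end as a comprehension over set lengths.
import Mathlib
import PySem

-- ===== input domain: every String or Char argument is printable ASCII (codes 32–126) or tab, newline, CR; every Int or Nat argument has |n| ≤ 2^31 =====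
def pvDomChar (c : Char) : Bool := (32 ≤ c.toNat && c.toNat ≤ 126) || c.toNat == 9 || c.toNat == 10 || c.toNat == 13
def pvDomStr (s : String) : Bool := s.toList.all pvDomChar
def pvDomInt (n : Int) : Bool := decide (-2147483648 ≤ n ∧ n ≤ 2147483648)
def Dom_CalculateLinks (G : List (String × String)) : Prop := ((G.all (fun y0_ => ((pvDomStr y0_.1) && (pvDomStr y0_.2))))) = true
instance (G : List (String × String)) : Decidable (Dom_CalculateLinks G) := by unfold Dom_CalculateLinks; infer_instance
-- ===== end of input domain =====

-- B replaces A's membership-guarded add and incremental counter bumps by a second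
-- adjacency-set dict whose set lengths yield the counts in a final pass (objective: simpler).

-- ===== PORT A =====
-- newpage(page, links, link_counts)
def pvNewpage (page : String) (links : PySem.Dict String (PySem.Set String))
    (cnt : PySem.Dict String Int) :
    PySem.Dict String (PySem.Set String) × PySem.Dict String Int :=
  (if links.contains page then links else links.insert page PySem.Set.empty,
   if cnt.contains page then cnt else cnt.insert page 0)

-- one iteration of A's loop body
def pvStepA (st : PySem.Dict String (PySem.Set String) × PySem.Dict String Int)
    (e : String × String) :
    PySem.Dict String (PySem.Set String) × PySem.Dict String Int :=
  let p1 := pvNewpage e.1 st.1 st.2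
  let p2 := pvNewpage e.2 p1.1 p1.2
  if (p2.1.getD e.2 PySem.Set.empty).contains e.1 then p2
  else (p2.1.insert e.2 ((p2.1.getD e.2 PySem.Set.empty).add e.1),
        p2.2.insert e.1 (p2.2.getD e.1 0 + 1))

def CalculateLinks (G : List (String × String)) :
    (List (String × List String)) × (List (String × Int)) :=
  let st := G.foldl pvStepA (PySem.Dict.empty, PySem.Dict.empty)
  (st.1.items, st.2.items)

-- ===== PORT B =====
-- one iteration of B's loop body: seed both dicts, then two unconditional set-adds
def pvStepB (st : PySem.Dict String (PySem.Set String) × PySem.Dict String (PySem.Set String))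
    (e : String × String) :
    PySem.Dict String (PySem.Set String) × PySem.Dict String (PySem.Set String) :=
  let links := (st.1.setdefault e.1 PySem.Set.empty).setdefault e.2 PySem.Set.empty
  let fwd := (st.2.setdefault e.1 PySem.Set.empty).setdefault e.2 PySem.Set.empty
  (links.insert e.2 ((links.getD e.2 PySem.Set.empty).add e.1),
   fwd.insert e.1 ((fwd.getD e.1 PySem.Set.empty).add e.2))

def CalculateLinks_alt (G : List (String × String)) :
    (List (String × List String)) × (List (String × Int)) :=
  let st := G.foldl pvStepB (PySem.Dict.empty, PySem.Dict.empty)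
  (st.1.items, st.2.items.map (fun p => (p.1, PySem.Set.len p.2)))

-- ===== PRECONDITION & SPEC =====
def Spec_CalculateLinks (G : List (String × String)) (out : (List (String × List String)) × (List (String × Int))) : Prop := out = CalculateLinks_alt G
instance (G : List (String × String)) (out : (List (String × List String)) × (List (String × Int))) : Decidable (Spec_CalculateLinks G out) := by unfold Spec_CalculateLinks; infer_instance

-- ===== CLAIM (what is proved, stated in full; the proofs are below) =====
def Claim_equal_CalculateLinks : Prop := ∀ (G : List (String × String)), Dom_CalculateLinks G → Spec_CalculateLinks G (CalculateLinks G)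

-- ===== LEMMAS AND PROOFS =====

-- the value map between B's forward sets and A's counters
def pvF (p : String × PySem.Set String) : String × Int := (p.1, (p.2.length : Int))

-- invariant relating A's state (lk, cnt) to B's state (lk, fwd)
def pvInv (lk : PySem.Dict String (PySem.Set String)) (cnt : PySem.Dict String Int)
    (fwd : PySem.Dict String (PySem.Set String)) : Prop :=
  lk.keys.Nodup ∧ fwd.keys.Nodup ∧
  cnt.items = fwd.items.map pvF ∧
  ∀ a b : String, a ∈ lk.getD b PySem.Set.empty ↔ b ∈ fwd.getD a PySem.Set.empty

theorem pv_if_contains_eq_setdefault {ν : Type} (d : PySem.Dict String ν) (k : String) (v : ν) :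
    (if d.contains k then d else d.insert k v) = d.setdefault k v := by
  by_cases h : d.contains k = true
  · simp [h, PySem.Dict.setdefault_of_contains d v h]
  · simp only [Bool.not_eq_true] at h
    simp [h, PySem.Dict.setdefault_of_not_contains d v h]

theorem pv_nodup_keys_setdefault {ν : Type} (d : PySem.Dict String ν) (k : String) (v : ν)
    (h : d.keys.Nodup) : (d.setdefault k v).keys.Nodup := by
  rw [PySem.Dict.keys_setdefault]
  by_cases hc : d.contains k = true
  · simp [hc, h]
  · simp only [Bool.not_eq_true] at hc
    have hk : k ∉ d.keys := by
      rw [PySem.Dict.contains_eq_decide_mem_keys] at hc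
      simpa using hc
    simp only [hc, Bool.false_eq_true, if_false, List.nodup_append]
    refine ⟨h, List.nodup_singleton k, ?_⟩
    intro a ha b hb
    rw [List.mem_singleton] at hb
    exact fun he => hk ((hb ▸ he) ▸ ha)

theorem pv_contains_of_items_map (cnt : PySem.Dict String Int)
    (fwd : PySem.Dict String (PySem.Set String)) (h : cnt.items = fwd.items.map pvF)
    (k : String) : cnt.contains k = fwd.contains k := by
  simp only [PySem.Dict.contains, h, List.any_map]
  rfl

theorem pv_get?_mk_map : ∀ (l : List (String × PySem.Set String)) (k : String),
    (PySem.Dict.mk (l.map pvF)).get? k = ((PySem.Dict.mk l).get? k).map (fun s => (s.length : Int)) := by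
  intro l
  induction l with
  | nil => intro k; rfl
  | cons p rest ih =>
    intro k
    have hF : pvF p = (p.1, (p.2.length : Int)) := rfl
    rw [List.map_cons, hF, PySem.Dict.get?_mk_cons, PySem.Dict.get?_mk_cons]
    by_cases h : (p.1 == k) = true
    · simp [h]
    · simp only [Bool.not_eq_true] at h
      simp [h, ih k]

theorem pv_getD_of_items_map (cnt : PySem.Dict String Int)
    (fwd : PySem.Dict String (PySem.Set String)) (h : cnt.items = fwd.items.map pvF)
    (k : String) : cnt.getD k 0 = ((fwd.getD k PySem.Set.empty).length : Int) := by
  have hc : cnt = PySem.Dict.mk (fwd.items.map pvF) := PySem.Dict.ext h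
  rw [hc, PySem.Dict.getD_eq_get?_getD, PySem.Dict.getD_eq_get?_getD,
      pv_get?_mk_map fwd.items k]
  cases PySem.Dict.get? { items := fwd.items } k <;> rfl

theorem pv_items_map_setdefault (cnt : PySem.Dict String Int)
    (fwd : PySem.Dict String (PySem.Set String)) (h : cnt.items = fwd.items.map pvF)
    (k : String) :
    (cnt.setdefault k 0).items = (fwd.setdefault k PySem.Set.empty).items.map pvF := by
  have hcon := pv_contains_of_items_map cnt fwd h k
  by_cases hc : fwd.contains k = true
  · rw [PySem.Dict.setdefault_of_contains fwd _ hc,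
        PySem.Dict.setdefault_of_contains cnt _ (by rw [hcon]; exact hc)]
    exact h
  · simp only [Bool.not_eq_true] at hc
    rw [PySem.Dict.setdefault_of_not_contains fwd _ hc,
        PySem.Dict.setdefault_of_not_contains cnt _ (by rw [hcon]; exact hc),
        PySem.Dict.items_insert_of_not_contains fwd _ hc,
        PySem.Dict.items_insert_of_not_contains cnt _ (by rw [hcon]; exact hc),
        List.map_append, h]
    rfl

theorem pv_items_map_insert (cnt : PySem.Dict String Int)
    (fwd : PySem.Dict String (PySem.Set String)) (h : cnt.items = fwd.items.map pvF)
    (k : String) (s : PySem.Set String) :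
    (cnt.insert k ((s.length : Int))).items = (fwd.insert k s).items.map pvF := by
  have hcon := pv_contains_of_items_map cnt fwd h k
  by_cases hc : fwd.contains k = true
  · rw [PySem.Dict.items_insert_of_contains fwd s hc,
        PySem.Dict.items_insert_of_contains cnt _ (by rw [hcon]; exact hc), h,
        List.map_map, List.map_map]
    apply List.map_congr_left
    intro p _
    by_cases hp : (p.1 == k) = true <;> simp [hp, pvF, Function.comp]
  · simp only [Bool.not_eq_true] at hc
    rw [PySem.Dict.items_insert_of_not_contains fwd _ hc,
        PySem.Dict.items_insert_of_not_contains cnt _ (by rw [hcon]; exact hc),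
        List.map_append, h]
    rfl

theorem pv_map_replace_notmem : ∀ (l : List (String × PySem.Set String)) (k : String)
    (v : PySem.Set String), k ∉ l.map Prod.fst →
    l.map (fun p => if p.1 == k then (k, v) else p) = l := by
  intro l
  induction l with
  | nil => intro k v _; rfl
  | cons p rest ih =>
    intro k v hk
    simp only [List.map_cons, List.mem_cons, not_or] at hk
    have hne : (p.1 == k) = false := by
      simp only [beq_eq_false_iff_ne, ne_eq]
      exact fun he => hk.1 he.symm
    rw [List.map_cons, hne]
    simp only [Bool.false_eq_true, if_false]
    rw [ih k v hk.2]

theorem pv_map_replace_id : ∀ (l : List (String × PySem.Set String)) (k : String)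
    (v : PySem.Set String), (l.map Prod.fst).Nodup →
    (PySem.Dict.mk l).get? k = some v →
    l.map (fun p => if p.1 == k then (k, v) else p) = l := by
  intro l
  induction l with
  | nil => intro k v _ hg; cases hg
  | cons p rest ih =>
    intro k v hnd hg
    rw [PySem.Dict.get?_mk_cons] at hg
    simp only [List.map_cons, List.nodup_cons] at hnd
    by_cases hp : (p.1 == k) = true
    · have hk : p.1 = k := by simpa using hp
      rw [if_pos hp] at hg
      have hv : v = p.2 := by simpa using hg.symm
      rw [List.map_cons, hp]
      simp only [if_true]
      rw [pv_map_replace_notmem rest k v (hk ▸ hnd.1), hv, ← hk]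
    · simp only [Bool.not_eq_true] at hp
      rw [hp] at hg
      simp only [Bool.false_eq_true, if_false] at hg
      rw [List.map_cons, hp]
      simp only [Bool.false_eq_true, if_false]
      rw [ih k v hnd.2 hg]

theorem pv_insert_getD_self {d : PySem.Dict String (PySem.Set String)} {k : String}
    (hnd : d.keys.Nodup) (hc : d.contains k = true) (d0 : PySem.Set String) :
    d.insert k (d.getD k d0) = d := by
  have hsome : ∃ v, d.get? k = some v := by
    rw [PySem.Dict.contains_eq_isSome_get?] at hc
    exact Option.isSome_iff_exists.mp hc
  obtain ⟨v, hv⟩ := hsome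
  have hnd' : (d.items.map Prod.fst).Nodup := by
    simpa [PySem.Dict.keys] using hnd
  apply PySem.Dict.ext
  rw [PySem.Dict.items_insert_of_contains d _ hc,
      PySem.Dict.getD_of_get?_eq_some d d0 hv]
  exact pv_map_replace_id d.items k v hnd' hv

theorem pv_getD_setdefault_empty (d : PySem.Dict String (PySem.Set String)) (k b : String) :
    (d.setdefault k PySem.Set.empty).getD b PySem.Set.empty = d.getD b PySem.Set.empty := by
  by_cases h : b = k
  · subst h
    exact PySem.Dict.getD_setdefault_self d b PySem.Set.empty PySem.Set.empty
  · rw [PySem.Dict.getD_eq_get?_getD, PySem.Dict.getD_eq_get?_getD,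
        PySem.Dict.get?_setdefault_of_ne d PySem.Set.empty h]

-- the core of the step argument, on already-seeded states
theorem pv_core (lk2 : PySem.Dict String (PySem.Set String)) (cnt2 : PySem.Dict String Int)
    (fwd2 : PySem.Dict String (PySem.Set String)) (i j : String)
    (hnl2 : lk2.keys.Nodup) (hnf2 : fwd2.keys.Nodup)
    (hitems2 : cnt2.items = fwd2.items.map pvF)
    (hsym2 : ∀ a b : String, a ∈ lk2.getD b PySem.Set.empty ↔ b ∈ fwd2.getD a PySem.Set.empty)
    (hclk : lk2.contains j = true) (hcfw : fwd2.contains i = true) :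
    (if (lk2.getD j PySem.Set.empty).contains i then (lk2, cnt2)
     else (lk2.insert j ((lk2.getD j PySem.Set.empty).add i),
           cnt2.insert i (cnt2.getD i 0 + 1))).1
      = (lk2.insert j ((lk2.getD j PySem.Set.empty).add i),
         fwd2.insert i ((fwd2.getD i PySem.Set.empty).add j)).1 ∧
    pvInv (if (lk2.getD j PySem.Set.empty).contains i then (lk2, cnt2)
     else (lk2.insert j ((lk2.getD j PySem.Set.empty).add i),
           cnt2.insert i (cnt2.getD i 0 + 1))).1
      (if (lk2.getD j PySem.Set.empty).contains i then (lk2, cnt2)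
     else (lk2.insert j ((lk2.getD j PySem.Set.empty).add i),
           cnt2.insert i (cnt2.getD i 0 + 1))).2
      (lk2.insert j ((lk2.getD j PySem.Set.empty).add i),
         fwd2.insert i ((fwd2.getD i PySem.Set.empty).add j)).2 := by
  by_cases hmem : i ∈ lk2.getD j PySem.Set.empty
  · have hcs : (lk2.getD j PySem.Set.empty).contains i = true :=
      (PySem.Set.contains_iff _ i).mpr hmem
    have hjt : j ∈ fwd2.getD i PySem.Set.empty := (hsym2 i j).mp hmem
    have hct : (fwd2.getD i PySem.Set.empty).contains j = true :=
      (PySem.Set.contains_iff _ j).mpr hjt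
    have hadds : (lk2.getD j PySem.Set.empty).add i = lk2.getD j PySem.Set.empty := by
      simp only [PySem.Set.add, hcs, if_true]
    have haddt : (fwd2.getD i PySem.Set.empty).add j = fwd2.getD i PySem.Set.empty := by
      simp only [PySem.Set.add, hct, if_true]
    have hlkB : lk2.insert j ((lk2.getD j PySem.Set.empty).add i) = lk2 := by
      rw [hadds]; exact pv_insert_getD_self hnl2 hclk PySem.Set.empty
    have hfwB : fwd2.insert i ((fwd2.getD i PySem.Set.empty).add j) = fwd2 := by
      rw [haddt]; exact pv_insert_getD_self hnf2 hcfw PySem.Set.empty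
    rw [if_pos hcs, hlkB, hfwB]
    exact ⟨rfl, hnl2, hnf2, hitems2, hsym2⟩
  · have hcs : (lk2.getD j PySem.Set.empty).contains i = false := by
      rw [← Bool.not_eq_true]
      intro hc; exact hmem ((PySem.Set.contains_iff _ i).mp hc)
    have hjt : j ∉ fwd2.getD i PySem.Set.empty := fun hj => hmem ((hsym2 i j).mpr hj)
    have hct : (fwd2.getD i PySem.Set.empty).contains j = false := by
      rw [← Bool.not_eq_true]
      intro hc; exact hjt ((PySem.Set.contains_iff _ j).mp hc)
    have hadds : (lk2.getD j PySem.Set.empty).add i = lk2.getD j PySem.Set.empty ++ [i] := by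
      simp only [PySem.Set.add, hcs, Bool.false_eq_true, if_false]
    have haddt : (fwd2.getD i PySem.Set.empty).add j = fwd2.getD i PySem.Set.empty ++ [j] := by
      simp only [PySem.Set.add, hct, Bool.false_eq_true, if_false]
    rw [if_neg (by rw [hcs]; exact Bool.false_ne_true)]
    refine ⟨rfl, PySem.Dict.nodup_keys_insert _ _ _ hnl2,
      PySem.Dict.nodup_keys_insert _ _ _ hnf2, ?_, ?_⟩
    · show (cnt2.insert i (cnt2.getD i 0 + 1)).items = _
      have hgd : cnt2.getD i 0 + 1 = ((((fwd2.getD i PySem.Set.empty).add j).length : Nat) : Int) := by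
        rw [pv_getD_of_items_map cnt2 fwd2 hitems2 i, haddt, List.length_append,
            List.length_singleton]
        push_cast; ring
      rw [hgd]
      exact pv_items_map_insert cnt2 fwd2 hitems2 i ((fwd2.getD i PySem.Set.empty).add j)
    · intro a b
      show a ∈ (lk2.insert j ((lk2.getD j PySem.Set.empty).add i)).getD b PySem.Set.empty ↔
           b ∈ (fwd2.insert i ((fwd2.getD i PySem.Set.empty).add j)).getD a PySem.Set.empty
      rw [PySem.Dict.getD_insert, PySem.Dict.getD_insert]
      by_cases hb : b = j <;> by_cases ha : a = i
      · rw [if_pos hb, if_pos ha, hadds, haddt]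
        simp [List.mem_append, ha, hb]
      · rw [if_pos hb, if_neg ha, hadds]
        simp only [List.mem_append, List.mem_singleton, ha, or_false]
        rw [hb]
        exact hsym2 a j
      · rw [if_neg hb, if_pos ha, haddt]
        simp only [List.mem_append, List.mem_singleton, hb, or_false]
        rw [ha]
        exact hsym2 i b
      · rw [if_neg hb, if_neg ha]
        exact hsym2 a b

theorem pv_step (lk : PySem.Dict String (PySem.Set String)) (cnt : PySem.Dict String Int)
    (fwd : PySem.Dict String (PySem.Set String)) (i j : String) (h : pvInv lk cnt fwd) :
    (pvStepA (lk, cnt) (i, j)).1 = (pvStepB (lk, fwd) (i, j)).1 ∧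
    pvInv (pvStepA (lk, cnt) (i, j)).1 (pvStepA (lk, cnt) (i, j)).2 (pvStepB (lk, fwd) (i, j)).2 := by
  obtain ⟨hnl, hnf, hitems, hsym⟩ := h
  have hA : pvStepA (lk, cnt) (i, j) =
      (if (((lk.setdefault i PySem.Set.empty).setdefault j PySem.Set.empty).getD j PySem.Set.empty).contains i
       then ((lk.setdefault i PySem.Set.empty).setdefault j PySem.Set.empty,
             (cnt.setdefault i 0).setdefault j 0)
       else (((lk.setdefault i PySem.Set.empty).setdefault j PySem.Set.empty).insert j
               ((((lk.setdefault i PySem.Set.empty).setdefault j PySem.Set.empty).getD j PySem.Set.empty).add i),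
             ((cnt.setdefault i 0).setdefault j 0).insert i
               (((cnt.setdefault i 0).setdefault j 0).getD i 0 + 1))) := by
    simp only [pvStepA, pvNewpage, pv_if_contains_eq_setdefault]
  have hB : pvStepB (lk, fwd) (i, j) =
      (((lk.setdefault i PySem.Set.empty).setdefault j PySem.Set.empty).insert j
         ((((lk.setdefault i PySem.Set.empty).setdefault j PySem.Set.empty).getD j PySem.Set.empty).add i),
       ((fwd.setdefault i PySem.Set.empty).setdefault j PySem.Set.empty).insert i
         ((((fwd.setdefault i PySem.Set.empty).setdefault j PySem.Set.empty).getD i PySem.Set.empty).add j)) := rfl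
  have hnl2 := pv_nodup_keys_setdefault _ j PySem.Set.empty
    (pv_nodup_keys_setdefault _ i PySem.Set.empty hnl)
  have hnf2 := pv_nodup_keys_setdefault _ j PySem.Set.empty
    (pv_nodup_keys_setdefault _ i PySem.Set.empty hnf)
  have hitems2 := pv_items_map_setdefault _ _ (pv_items_map_setdefault _ _ hitems i) j
  have hsym2 : ∀ a b : String,
      a ∈ ((lk.setdefault i PySem.Set.empty).setdefault j PySem.Set.empty).getD b PySem.Set.empty ↔
      b ∈ ((fwd.setdefault i PySem.Set.empty).setdefault j PySem.Set.empty).getD a PySem.Set.empty := by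
    intro a b
    rw [pv_getD_setdefault_empty, pv_getD_setdefault_empty,
        pv_getD_setdefault_empty, pv_getD_setdefault_empty]
    exact hsym a b
  have hclk : ((lk.setdefault i PySem.Set.empty).setdefault j PySem.Set.empty).contains j = true := by
    rw [PySem.Dict.contains_setdefault]; simp
  have hcfw : ((fwd.setdefault i PySem.Set.empty).setdefault j PySem.Set.empty).contains i = true := by
    rw [PySem.Dict.contains_setdefault, PySem.Dict.contains_setdefault]; simp
  rw [hA, hB]
  exact pv_core _ _ _ i j hnl2 hnf2 hitems2 hsym2 hclk hcfw

theorem pv_fold : ∀ (G : List (String × String)) (lk : PySem.Dict String (PySem.Set String))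
    (cnt : PySem.Dict String Int) (fwd : PySem.Dict String (PySem.Set String)),
    pvInv lk cnt fwd →
    (G.foldl pvStepA (lk, cnt)).1 = (G.foldl pvStepB (lk, fwd)).1 ∧
    pvInv (G.foldl pvStepA (lk, cnt)).1 (G.foldl pvStepA (lk, cnt)).2
          (G.foldl pvStepB (lk, fwd)).2 := by
  intro G
  induction G with
  | nil => intro lk cnt fwd h; exact ⟨rfl, h⟩
  | cons e rest ih =>
    intro lk cnt fwd h
    obtain ⟨heq, hinv⟩ := pv_step lk cnt fwd e.1 e.2 h
    simp only [List.foldl_cons]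
    have hstA : pvStepA (lk, cnt) e = ((pvStepA (lk, cnt) (e.1, e.2)).1, (pvStepA (lk, cnt) (e.1, e.2)).2) := by rfl
    have hstB : pvStepB (lk, fwd) e = ((pvStepB (lk, fwd) (e.1, e.2)).1, (pvStepB (lk, fwd) (e.1, e.2)).2) := by rfl
    rw [hstA, hstB, ← heq]
    exact ih _ _ _ hinv

-- ===== VERDICT (by name: the statement is the Claim_ definition above) =====
theorem CalculateLinks_spec : Claim_equal_CalculateLinks := by
  intro G _
  unfold Spec_CalculateLinks
  have hdefA : CalculateLinks G =
      ((G.foldl pvStepA (PySem.Dict.empty, PySem.Dict.empty)).1.items,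
       (G.foldl pvStepA (PySem.Dict.empty, PySem.Dict.empty)).2.items) := rfl
  have hdefB : CalculateLinks_alt G =
      ((G.foldl pvStepB (PySem.Dict.empty, PySem.Dict.empty)).1.items,
       (G.foldl pvStepB (PySem.Dict.empty, PySem.Dict.empty)).2.items.map
         (fun p => (p.1, PySem.Set.len p.2))) := rfl
  have hinv : pvInv PySem.Dict.empty PySem.Dict.empty PySem.Dict.empty := by
    refine ⟨by simp [PySem.Dict.keys_empty], by simp [PySem.Dict.keys_empty], rfl, ?_⟩
    intro a b
    simp [PySem.Dict.getD_empty, PySem.Set.empty]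
  obtain ⟨heq, _, _, hitems, _⟩ :=
    pv_fold G PySem.Dict.empty PySem.Dict.empty PySem.Dict.empty hinv
  rw [hdefA, hdefB, heq, hitems]
  refine Prod.ext rfl ?_
  show List.map pvF _ = _
  apply List.map_congr_left
  intro p _
  simp [pvF, PySem.Set.len]
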